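-- pv_equiv track=rewrite | github.com/UndercoverEconomist/arc-solver | analysis/calculate_performance_by_generations.py | calculate_cumulative_solves
-- ===== SOURCE A (Python) =====
-- from typing import Dict, List, Tuple
--
-- def calculate_cumulative_solves(tasks_data: List[Dict], max_loops: int = 6) -> Dict[int, int]:
--     """
--     Calculate cumulative number of tasks solved at each loop.
--     If a task is solved at loop n, it's considered solved at all subsequent loops.
--
--     Args:
--         tasks_data: List of task data dictionaries
--         max_loops: Maximum number of loops to track (0-5 = 6 loops)
--
--     Returns:
--         Dictionary mapping loop number to cumulative count of solved tasks
--     """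
--     cumulative_solves = {i: 0 for i in range(max_loops)}
--
--     for task in tasks_data:
--         if task['solved'] and task['solved_at_loop'] is not None:
--             solved_at = task['solved_at_loop']
--             # Mark as solved for this loop and all subsequent loops
--             for loop in range(solved_at, max_loops):
--                 cumulative_solves[loop] += 1
--
--     return cumulative_solves
-- ===== SOURCE B (Python) =====
-- from typing import Dict, List
--
--
-- def calculate_cumulative_solves(tasks_data: List[Dict], max_loops: int = 6) -> Dict[int, int]:
--     # Bucket-count the solve loops once, then one prefix-sum pass over the range.
--     counts = {}
--     for task in tasks_data:
--         if task['solved'] and task['solved_at_loop'] is not None: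
--             s = task['solved_at_loop']
--             if 0 <= s < max_loops:
--                 counts[s] = counts.get(s, 0) + 1
--     result = {}
--     running = 0
--     for i in range(max_loops):
--         running += counts.get(i, 0)
--         result[i] = running
--     return result
-- ===== Notes on version B (the rewrite author's own statement) =====
-- stated objective: alternative
-- what changed: A increments every dict entry from solved_at up to max_loops for each solved task (nested loops over tasks x range); B instead bucket-counts solve loops in one pass over the tasks and then produces the result with a single running prefix-sum pass over range(max_loops).
import Mathlib
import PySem

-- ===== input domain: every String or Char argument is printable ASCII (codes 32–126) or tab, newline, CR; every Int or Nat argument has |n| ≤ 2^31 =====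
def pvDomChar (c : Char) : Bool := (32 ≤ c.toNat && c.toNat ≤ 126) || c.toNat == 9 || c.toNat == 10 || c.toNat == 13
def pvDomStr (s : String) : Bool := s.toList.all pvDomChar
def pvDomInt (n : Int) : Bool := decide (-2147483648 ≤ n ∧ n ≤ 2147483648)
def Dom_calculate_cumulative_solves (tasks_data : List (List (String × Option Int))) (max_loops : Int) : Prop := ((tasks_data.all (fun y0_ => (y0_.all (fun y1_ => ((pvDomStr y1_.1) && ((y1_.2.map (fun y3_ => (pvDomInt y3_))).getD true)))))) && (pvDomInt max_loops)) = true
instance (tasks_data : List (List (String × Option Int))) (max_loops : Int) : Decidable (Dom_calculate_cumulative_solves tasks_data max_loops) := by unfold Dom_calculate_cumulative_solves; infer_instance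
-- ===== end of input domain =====

-- B replaces A's nested "bump every later loop" dict updates by a one-pass bucket count plus a
-- running prefix sum over range(max_loops) (objective: alternative decomposition, same result).

-- ===== PORT A =====
def calculate_cumulative_solves (tasks_data : List (List (String × Option Int))) (max_loops : Int) : List (Int × Int) :=
  -- cumulative_solves = {i: 0 for i in range(max_loops)}
  let init : PySem.Dict Int Int :=
    (PySem.List.pyRange 0 max_loops).foldl (fun d i => d.insert i 0) PySem.Dict.empty
  let final : PySem.Dict Int Int := tasks_data.foldl (fun d task =>
    match (PySem.Dict.mk task).get? "solved" with
    | some (some s) =>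
      if s ≠ 0 then
        match (PySem.Dict.mk task).get? "solved_at_loop" with
        | some (some v) =>
            -- `cumulative_solves[loop] += 1`: under Pre_ every visited key is present, so
            -- Dict.modify is exact (a missing key would be a KeyError, excluded by Pre_)
            (PySem.List.pyRange v max_loops).foldl (fun d loop => d.modify loop 0 (· + 1)) d
        | some none => d        -- value None: `is not None` fails, skip
        | none => d             -- missing 'solved_at_loop' key: KeyError, excluded by Pre_
      else d                    -- task['solved'] falsy (0)
    | some none => d            -- task['solved'] is None: falsy, skip
    | none => d) init           -- missing 'solved' key: KeyError, excluded by Pre_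
  final.items

-- ===== PORT B =====
def calculate_cumulative_solves_alt (tasks_data : List (List (String × Option Int))) (max_loops : Int) : List (Int × Int) :=
  -- bucket count: counts[s] = number of tasks solved at loop s (s within range)
  let counts : PySem.Dict Int Int := tasks_data.foldl (fun c task =>
    match (PySem.Dict.mk task).get? "solved" with
    | some (some s) =>
      if s ≠ 0 then
        match (PySem.Dict.mk task).get? "solved_at_loop" with
        | some (some v) => if 0 ≤ v ∧ v < max_loops then c.insert v (c.getD v 0 + 1) else c
        | some none => c
        | none => c             -- missing key: KeyError in Python, excluded by Pre_
      else c
    | some none => c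
    | none => c) PySem.Dict.empty
  -- prefix-sum pass: result[i] = running total of counts[0..i]
  (((PySem.List.pyRange 0 max_loops).foldl
      (fun (p : PySem.Dict Int Int × Int) i =>
        let running := p.2 + counts.getD i 0
        (p.1.insert i running, running))
      (PySem.Dict.empty, 0)).1).items

-- ===== PRECONDITION & SPEC =====
-- A task passes iff A raises no exception on it: the 'solved' key exists; when its value is
-- truthy the 'solved_at_loop' key exists too; and a solved-at loop v is not negative unless
-- range(v, max_loops) is empty (a negative v with v < max_loops makes A hit a missing dict
-- key: KeyError). Pre_ excludes exactly the inputs on which A raises, nothing else.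
def pvTaskOK (max_loops : Int) (task : List (String × Option Int)) : Bool :=
  match (PySem.Dict.mk task).get? "solved" with
  | none => false
  | some none => true
  | some (some s) =>
    if s = 0 then true
    else match (PySem.Dict.mk task).get? "solved_at_loop" with
      | none => false
      | some none => true
      | some (some v) => decide (0 ≤ v ∨ max_loops ≤ v)

def Pre_calculate_cumulative_solves (tasks_data : List (List (String × Option Int))) (max_loops : Int) : Prop :=
  tasks_data.all (pvTaskOK max_loops) = true
instance (tasks_data : List (List (String × Option Int))) (max_loops : Int) : Decidable (Pre_calculate_cumulative_solves tasks_data max_loops) := by unfold Pre_calculate_cumulative_solves; infer_instance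

def pvWitness_calculate_cumulative_solves : (List (List (String × Option Int))) × Int :=
  ([[("solved", some 1), ("solved_at_loop", some 0)], [("solved", some 0)]], 2)

def Spec_calculate_cumulative_solves (tasks_data : List (List (String × Option Int))) (max_loops : Int) (out : List (Int × Int)) : Prop := out = calculate_cumulative_solves_alt tasks_data max_loops
instance (tasks_data : List (List (String × Option Int))) (max_loops : Int) (out : List (Int × Int)) : Decidable (Spec_calculate_cumulative_solves tasks_data max_loops out) := by unfold Spec_calculate_cumulative_solves; infer_instance

-- ===== CLAIM (what is proved, stated in full; the proofs are below) =====
def Claim_equal_calculate_cumulative_solves : Prop := ∀ (tasks_data : List (List (String × Option Int))) (max_loops : Int), Dom_calculate_cumulative_solves tasks_data max_loops → Pre_calculate_cumulative_solves tasks_data max_loops → Spec_calculate_cumulative_solves tasks_data max_loops (calculate_cumulative_solves tasks_data max_loops)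

-- ===== LEMMAS AND PROOFS =====

-- the solve loop a task contributes, if any (None ⇔ the task is skipped by both programs)
def pvSolvedAt (task : List (String × Option Int)) : Option Int :=
  match (PySem.Dict.mk task).get? "solved" with
  | some (some s) =>
    if s ≠ 0 then
      match (PySem.Dict.mk task).get? "solved_at_loop" with
      | some (some v) => some v
      | _ => none
    else none
  | _ => none

-- A's per-solve inner loop
def pvStepMod (M : Int) (d : PySem.Dict Int Int) (v : Int) : PySem.Dict Int Int :=
  (PySem.List.pyRange v M).foldl (fun d loop => d.modify loop 0 (· + 1)) d

-- B's prefix-sum trace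
def pvRun (counts : PySem.Dict Int Int) : Int → List Int → List (Int × Int)
  | _, [] => []
  | acc, i :: rest => (i, acc + counts.getD i 0) :: pvRun counts (acc + counts.getD i 0) rest

lemma pv_set_update_id (l s : List Int) (h : ∀ x ∈ l, x ∈ s) : PySem.Set.update s l = s := by
  induction l generalizing s with
  | nil => rfl
  | cons x t ih =>
    have hx : x ∈ s := h x (by simp)
    have hadd : PySem.Set.add s x = s := by simp [PySem.Set.add, PySem.Set.contains, hx]
    simp only [PySem.Set.update, List.foldl_cons, hadd]
    exact ih s (fun y hy => h y (by simp [hy]))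

lemma pv_countP_le_split (l : List Int) (a : Int) :
    l.countP (fun v => decide (v ≤ a)) = l.countP (fun v => decide (v < a)) + l.count a := by
  induction l with
  | nil => simp
  | cons x t ih =>
    simp only [List.countP_cons, List.count_cons, ih]
    by_cases h1 : x ≤ a <;> by_cases h2 : x < a <;> by_cases h3 : x = a <;>
      simp [h1, h2, h3] <;> omega

lemma pv_A_fold_eq (tasks : List (List (String × Option Int))) (M : Int) (d : PySem.Dict Int Int) :
    tasks.foldl (fun d task =>
      match (PySem.Dict.mk task).get? "solved" with
      | some (some s) =>
        if s ≠ 0 then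
          match (PySem.Dict.mk task).get? "solved_at_loop" with
          | some (some v) =>
              (PySem.List.pyRange v M).foldl (fun d loop => d.modify loop 0 (· + 1)) d
          | some none => d
          | none => d
        else d
      | some none => d
      | none => d) d
    = (tasks.filterMap pvSolvedAt).foldl (pvStepMod M) d := by
  have hst : pvStepMod M = fun d v => (PySem.List.pyRange v M).foldl (fun d loop => d.modify loop 0 (· + 1)) d := rfl
  rw [hst]
  rw [List.foldl_filterMap]
  apply PySem.List.foldl_congr_mem
  intro acc t _
  simp only [pvSolvedAt]
  rcases h1 : (PySem.Dict.mk t).get? "solved" with _ | (_ | s)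
  · rfl
  · rfl
  · by_cases hs : s = 0
    · simp [hs]
    · rcases h2 : (PySem.Dict.mk t).get? "solved_at_loop" with _ | (_ | v) <;> simp [hs]

lemma pv_B_fold_eq (tasks : List (List (String × Option Int))) (M : Int) (c : PySem.Dict Int Int) :
    tasks.foldl (fun c task =>
      match (PySem.Dict.mk task).get? "solved" with
      | some (some s) =>
        if s ≠ 0 then
          match (PySem.Dict.mk task).get? "solved_at_loop" with
          | some (some v) => if 0 ≤ v ∧ v < M then c.insert v (c.getD v 0 + 1) else c
          | some none => c
          | none => c
        else c
      | some none => c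
      | none => c) c
    = (tasks.filterMap pvSolvedAt).foldl
        (fun c v => if 0 ≤ v ∧ v < M then c.insert v (c.getD v 0 + 1) else c) c := by
  rw [List.foldl_filterMap]
  apply PySem.List.foldl_congr_mem
  intro acc t _
  simp only [pvSolvedAt]
  rcases h1 : (PySem.Dict.mk t).get? "solved" with _ | (_ | s)
  · rfl
  · rfl
  · by_cases hs : s = 0
    · simp [hs]
    · rcases h2 : (PySem.Dict.mk t).get? "solved_at_loop" with _ | (_ | v) <;> simp [hs]

def pvCounts (tasks : List (List (String × Option Int))) (M : Int) : PySem.Dict Int Int :=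
  (tasks.filterMap pvSolvedAt).foldl
    (fun c v => if 0 ≤ v ∧ v < M then c.insert v (c.getD v 0 + 1) else c) PySem.Dict.empty

lemma pv_A_items (tasks : List (List (String × Option Int))) (M : Int) :
    calculate_cumulative_solves tasks M
      = ((tasks.filterMap pvSolvedAt).foldl (pvStepMod M)
          ((PySem.List.pyRange 0 M).foldl (fun d i => d.insert i 0) PySem.Dict.empty)).items :=
  congrArg PySem.Dict.items
    (pv_A_fold_eq tasks M ((PySem.List.pyRange 0 M).foldl (fun d i => d.insert i 0) PySem.Dict.empty))

lemma pv_alt_eq (tasks : List (List (String × Option Int))) (M : Int) :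
    calculate_cumulative_solves_alt tasks M
      = ((PySem.List.pyRange 0 M).foldl
          (fun (p : PySem.Dict Int Int × Int) i =>
            let running := p.2 + (pvCounts tasks M).getD i 0
            (p.1.insert i running, running)) (PySem.Dict.empty, 0)).1.items :=
  congrArg
    (fun c : PySem.Dict Int Int =>
      ((PySem.List.pyRange 0 M).foldl
        (fun (p : PySem.Dict Int Int × Int) i =>
          let running := p.2 + c.getD i 0
          (p.1.insert i running, running)) (PySem.Dict.empty, 0)).1.items)
    (pv_B_fold_eq tasks M PySem.Dict.empty)

lemma pv_hv_of_pre (tasks : List (List (String × Option Int))) (M : Int)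
    (h : Pre_calculate_cumulative_solves tasks M) :
    ∀ v ∈ tasks.filterMap pvSolvedAt, 0 ≤ v ∨ M ≤ v := by
  intro v hv
  rw [List.mem_filterMap] at hv
  obtain ⟨t, ht, hsv⟩ := hv
  have hok : pvTaskOK M t = true := by
    rw [Pre_calculate_cumulative_solves, List.all_eq_true] at h
    exact h t ht
  simp only [pvSolvedAt] at hsv
  simp only [pvTaskOK] at hok
  rcases h1 : (PySem.Dict.mk t).get? "solved" with _ | (_ | s) <;> rw [h1] at hsv hok <;>
    try simp at hsv
  by_cases hs : s = 0
  · simp [hs] at hsv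
  · simp only [hs, not_false_eq_true, if_false] at hsv hok
    rcases h2 : (PySem.Dict.mk t).get? "solved_at_loop" with _ | (_ | w) <;> rw [h2] at hsv hok <;>
      simp at hsv hok
    omega

lemma pv_getD_stepMod (M v i : Int) (d : PySem.Dict Int Int) (h0 : 0 ≤ i) (hi : i < M) :
    (pvStepMod M d v).getD i 0 = d.getD i 0 + if v ≤ i then 1 else 0 := by
  rw [pvStepMod, PySem.Dict.getD_foldl_modify_add_one]
  congr 1
  by_cases hvi : v ≤ i
  · have hmem : i ∈ PySem.List.pyRange v M := by rw [PySem.List.mem_pyRange_one]; omega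
    have hc := List.count_eq_one_of_mem (PySem.List.nodup_pyRange_one v M) hmem
    simp [hc, hvi]
  · have hnm : i ∉ PySem.List.pyRange v M := by rw [PySem.List.mem_pyRange_one]; omega
    simp [List.count_eq_zero_of_not_mem hnm, hvi]

lemma pv_keys_stepMod (M v : Int) (d : PySem.Dict Int Int) (hv : 0 ≤ v ∨ M ≤ v)
    (h : d.keys = PySem.List.pyRange 0 M) : (pvStepMod M d v).keys = PySem.List.pyRange 0 M := by
  rw [pvStepMod, PySem.Dict.keys_foldl_modify (f := fun _ _ => (· + 1)), h]
  apply pv_set_update_id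
  intro x hx
  rw [PySem.List.mem_pyRange_one] at hx ⊢
  omega

lemma pv_getD_foldA (M : Int) (solves : List Int) : ∀ (d : PySem.Dict Int Int) (i : Int), 0 ≤ i → i < M →
    (solves.foldl (pvStepMod M) d).getD i 0
      = d.getD i 0 + (solves.countP (fun v => decide (v ≤ i)) : Int) := by
  induction solves with
  | nil => intro d i _ _; simp
  | cons v t ih =>
    intro d i h0 hi
    rw [List.foldl_cons, ih _ i h0 hi, pv_getD_stepMod M v i d h0 hi, List.countP_cons]
    by_cases hvi : v ≤ i <;> simp [hvi] <;> push_cast <;> ring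

lemma pv_keys_foldA (M : Int) (solves : List Int) (hv : ∀ v ∈ solves, 0 ≤ v ∨ M ≤ v) :
    ∀ (d : PySem.Dict Int Int), d.keys = PySem.List.pyRange 0 M →
    (solves.foldl (pvStepMod M) d).keys = PySem.List.pyRange 0 M := by
  induction solves with
  | nil => intro d h; simpa using h
  | cons v t ih =>
    intro d h
    rw [List.foldl_cons]
    exact ih (fun w hw => hv w (by simp [hw])) _
      (pv_keys_stepMod M v d (hv v (by simp)) h)

lemma pv_init_getD (M : Int) : ∀ (j : Int),
    ((PySem.List.pyRange 0 M).foldl (fun d i => d.insert i 0) (PySem.Dict.empty : PySem.Dict Int Int)).getD j 0 = 0 := by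
  have gen : ∀ (L : List Int) (d : PySem.Dict Int Int), (∀ j, d.getD j 0 = 0) →
      ∀ j, (L.foldl (fun d i => d.insert i 0) d).getD j 0 = 0 := by
    intro L
    induction L with
    | nil => intro d h j; simpa using h j
    | cons x t ih =>
      intro d h j
      rw [List.foldl_cons]
      refine ih _ (fun k => ?_) j
      rw [PySem.Dict.getD_insert]
      split <;> simp [h]
  exact fun j => gen _ _ (fun k => by simp) j

lemma pv_init_keys (M : Int) :
    ((PySem.List.pyRange 0 M).foldl (fun d i => d.insert i 0) (PySem.Dict.empty : PySem.Dict Int Int)).keys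
      = PySem.List.pyRange 0 M := by
  rw [PySem.Dict.keys_foldl_insert (f := fun _ _ => 0)]
  have h1 : (PySem.Dict.empty : PySem.Dict Int Int).keys = [] := by simp
  rw [h1]
  show PySem.Set.ofList (PySem.List.pyRange 0 M) = _
  exact PySem.Set.ofList_eq_self_of_nodup _ (PySem.List.nodup_pyRange_one 0 M)

-- A's value: entry i holds the number of solves at loop ≤ i
lemma pv_A_char (tasks : List (List (String × Option Int))) (M : Int)
    (hPre : Pre_calculate_cumulative_solves tasks M) :
    calculate_cumulative_solves tasks M
      = (PySem.List.pyRange 0 M).map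
          (fun i => (i, ((tasks.filterMap pvSolvedAt).countP (fun v => decide (v ≤ i)) : Int))) := by
  have hv := pv_hv_of_pre tasks M hPre
  rw [pv_A_items]
  have hkeys := pv_keys_foldA M (tasks.filterMap pvSolvedAt) hv _ (pv_init_keys M)
  have hnd : ((tasks.filterMap pvSolvedAt).foldl (pvStepMod M)
      ((PySem.List.pyRange 0 M).foldl (fun d i => d.insert i 0) PySem.Dict.empty)).keys.Nodup := by
    rw [hkeys]; exact PySem.List.nodup_pyRange_one 0 M
  rw [PySem.Dict.items_eq_map_keys _ hnd 0, hkeys]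
  apply List.map_congr_left
  intro i hi
  rw [PySem.List.mem_pyRange_one] at hi
  rw [pv_getD_foldA M _ _ i hi.1 hi.2, pv_init_getD M i, zero_add]

lemma pv_counts_getD (tasks : List (List (String × Option Int))) (M i : Int) (h0 : 0 ≤ i) (hi : i < M) :
    (pvCounts tasks M).getD i 0 = ((tasks.filterMap pvSolvedAt).count i : Int) := by
  unfold pvCounts
  have gen : ∀ (l : List Int) (c : PySem.Dict Int Int),
      (l.foldl (fun c v => if 0 ≤ v ∧ v < M then c.insert v (c.getD v 0 + 1) else c) c).getD i 0
        = c.getD i 0 + (l.count i : Int) := by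
    intro l
    induction l with
    | nil => intro c; simp
    | cons v t ih =>
      intro c
      rw [List.foldl_cons, List.count_cons]
      by_cases hvi : v = i
      · subst hvi
        rw [if_pos ⟨h0, hi⟩, ih, PySem.Dict.getD_insert]
        simp; push_cast; ring
      · have h1 : (if 0 ≤ v ∧ v < M then c.insert v (c.getD v 0 + 1) else c).getD i 0
            = c.getD i 0 := by
          split
          · exact PySem.Dict.getD_insert_of_ne _ _ _ (fun h => hvi h.symm)
          · rfl
        rw [ih, h1]
        simp [hvi]
  rw [gen, PySem.Dict.getD_empty, zero_add]

lemma pv_run_items (counts : PySem.Dict Int Int) :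
    ∀ (L : List Int) (d : PySem.Dict Int Int) (acc : Int), L.Nodup → (∀ i ∈ L, d.contains i = false) →
    ((L.foldl (fun (p : PySem.Dict Int Int × Int) i =>
        let running := p.2 + counts.getD i 0
        (p.1.insert i running, running)) (d, acc)).1).items
      = d.items ++ pvRun counts acc L := by
  intro L
  induction L with
  | nil => intro d acc _ _; simp [pvRun]
  | cons i t ih =>
    intro d acc hnd hfresh
    have hci : d.contains i = false := hfresh i (by simp)
    rw [List.foldl_cons]
    have hfresh' : ∀ j ∈ t, (d.insert i (acc + counts.getD i 0)).contains j = false := by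
      intro j hj
      rw [PySem.Dict.contains_insert]
      have hji : j ≠ i := by rintro rfl; exact (List.nodup_cons.1 hnd).1 hj
      simp [hji, hfresh j (by simp [hj])]
    rw [ih _ _ (List.nodup_cons.1 hnd).2 hfresh',
        PySem.Dict.items_insert_of_not_contains _ _ hci]
    simp [pvRun]

lemma pv_run_eq (counts : PySem.Dict Int Int) (M : Int) (solves : List Int)
    (hs : ∀ v ∈ solves, 0 ≤ v)
    (hc : ∀ i, 0 ≤ i → i < M → counts.getD i 0 = (solves.count i : Int)) :
    ∀ (n : Nat) (a acc : Int), 0 ≤ a → (M - a).toNat = n →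
      acc = (solves.countP (fun v => decide (v < a)) : Int) →
      pvRun counts acc (PySem.List.pyRange a M)
        = (PySem.List.pyRange a M).map
            (fun i => (i, (solves.countP (fun v => decide (v ≤ i)) : Int))) := by
  intro n
  induction n with
  | zero =>
    intro a acc ha hn hacc
    have : ¬ a < M := by omega
    rw [PySem.List.pyRange_one_eq_nil (by omega)]
    simp [pvRun]
  | succ n ih =>
    intro a acc ha hn hacc
    by_cases hM : a < M
    · rw [PySem.List.pyRange_one_cons hM]
      have hhead : acc + counts.getD a 0 = (solves.countP (fun v => decide (v ≤ a)) : Int) := by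
        rw [hc a ha hM, hacc, pv_countP_le_split solves a]
        push_cast; ring
      have htail : pvRun counts ((solves.countP (fun v => decide (v ≤ a)) : Int))
            (PySem.List.pyRange (a + 1) M)
          = (PySem.List.pyRange (a + 1) M).map
              (fun i => (i, (solves.countP (fun v => decide (v ≤ i)) : Int))) := by
        refine ih (a + 1) _ (by omega) (by omega) ?_
        congr 1
        apply List.countP_congr
        intro v _
        simp [Int.lt_add_one_iff]
      simp only [pvRun, List.map_cons]
      rw [hhead, htail]
    · rw [PySem.List.pyRange_one_eq_nil (by omega)]
      simp [pvRun]

-- ===== VERDICT (by name: the statement is the Claim_ definition above) =====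
theorem calculate_cumulative_solves_spec : Claim_equal_calculate_cumulative_solves := by
  intro tasks M hDom hPre
  unfold Spec_calculate_cumulative_solves
  rw [pv_A_char tasks M hPre, pv_alt_eq tasks M]
  rw [pv_run_items (pvCounts tasks M) (PySem.List.pyRange 0 M) PySem.Dict.empty 0
      (PySem.List.nodup_pyRange_one 0 M) (fun i _ => by simp)]
  rw [show (PySem.Dict.empty : PySem.Dict Int Int).items = [] from rfl, List.nil_append]
  by_cases hM : 0 < M
  · have hv := pv_hv_of_pre tasks M hPre
    have hs : ∀ v ∈ tasks.filterMap pvSolvedAt, 0 ≤ v := by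
      intro v hvm; rcases hv v hvm with h | h <;> omega
    have hz : (tasks.filterMap pvSolvedAt).countP (fun v => decide (v < 0)) = 0 :=
      List.countP_eq_zero.2 (by intro v hvm; have := hs v hvm; simp; omega)
    rw [pv_run_eq (pvCounts tasks M) M (tasks.filterMap pvSolvedAt) hs
        (fun i h0 hi => pv_counts_getD tasks M i h0 hi) (M - 0).toNat 0 0 le_rfl rfl
        (by rw [hz]; simp)]
  · rw [PySem.List.pyRange_one_eq_nil (by omega)]
    simp [pvRun]
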